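-- pv_equiv track=rewrite | github.com/miliar/Code_Jam_Webscraper | solutions_python/solutions_year14_round0_nr4/1333.py | solveDeceive
-- ===== SOURCE A (Python) =====
-- def solveDeceive(naomi, ken, points):
--     points = 0
--     l = len(naomi)
--     while l>0:
--         if naomi[0] > ken[0]:
--             ken = ken[1:]
--             points+=1
--         else:
--             ken = ken[:-1]
--         naomi = naomi[1:]
--         l-=1
--     return points
-- ===== SOURCE B (Python) =====
-- def solveDeceive(naomi, ken, points):
--     # A only ever inspects ken's front element; losses trim ken's back,
--     # which never influences the front. So one index (lo = wins so far)
--     # into the untouched ken suffices: O(n) instead of O(n^2) slicing.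
--     points = 0
--     lo = 0
--     for x in naomi:
--         if x > ken[lo]:
--             lo += 1
--             points += 1
--     return points
-- ===== Notes on version B (the rewrite author's own statement) =====
-- stated objective: faster
-- what changed: Replaces the per-round list slicing of both lists with a single pass over naomi and one advancing index into an untouched ken (the back-trimming of ken never affects the front element A reads, so it is dropped entirely).
-- outside the precondition, e.g. on solveDeceive([1, 2], [5], 0): A raises IndexError, B returns 0
import Mathlib
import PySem

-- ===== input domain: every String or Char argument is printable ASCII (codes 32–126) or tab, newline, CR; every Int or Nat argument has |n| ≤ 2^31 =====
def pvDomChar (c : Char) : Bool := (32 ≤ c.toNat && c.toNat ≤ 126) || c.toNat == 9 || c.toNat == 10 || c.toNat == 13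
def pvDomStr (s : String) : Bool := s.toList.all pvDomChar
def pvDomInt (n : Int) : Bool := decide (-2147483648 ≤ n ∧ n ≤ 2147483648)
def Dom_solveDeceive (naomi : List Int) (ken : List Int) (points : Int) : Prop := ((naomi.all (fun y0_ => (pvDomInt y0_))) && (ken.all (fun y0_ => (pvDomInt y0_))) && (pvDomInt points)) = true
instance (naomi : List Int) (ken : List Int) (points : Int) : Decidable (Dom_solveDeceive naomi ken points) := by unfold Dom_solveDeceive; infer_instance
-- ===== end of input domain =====

-- B replaces A's per-round slicing of both lists with one pass and a single
-- advancing front index into an untouched ken (objective: faster, asymptotic).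
-- Pre_ excludes inputs with len(naomi) > len(ken), on which A raises IndexError (ken runs empty).
-- ===== PORT A =====
-- while l>0 loop of A, recursing on naomi (naomi = naomi[1:], l -= 1 each round);
-- ken[0] on empty ken raises in Python (excluded by Pre_); [] case is a totality guard.
def solveDeceiveGoA : List Int → List Int → Int → Int
  | [], _, pts => pts
  | _ :: ns, [], pts => pts
  | n :: ns, k :: ks, pts =>
    if n > k then solveDeceiveGoA ns ks (pts + 1)            -- ken = ken[1:]; points += 1
    else solveDeceiveGoA ns ((k :: ks).dropLast) pts         -- ken = ken[:-1]

def solveDeceive (naomi : List Int) (ken : List Int) (points : Int) : Int :=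
  solveDeceiveGoA naomi ken 0                                -- points = 0

-- ===== PORT B =====
-- one pass over naomi; lo : Nat is B's nonnegative index, so ken[lo] is getElem?
-- (exact for Python's ken[lo] with lo ≥ 0); the none case is where Python raises (outside Pre_).
def solveDeceiveGoB (ken : List Int) : List Int → Nat → Int → Int
  | [], _, pts => pts
  | x :: xs, lo, pts =>
    match ken[lo]? with
    | none => pts
    | some k => if x > k then solveDeceiveGoB ken xs (lo + 1) (pts + 1)
                else solveDeceiveGoB ken xs lo pts

def solveDeceive_alt (naomi : List Int) (ken : List Int) (points : Int) : Int :=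
  solveDeceiveGoB ken naomi 0 0

-- ===== PRECONDITION & SPEC =====
-- Pre_ excludes exactly the inputs where A raises IndexError: ken shorter than naomi.
def Pre_solveDeceive (naomi : List Int) (ken : List Int) (points : Int) : Prop :=
  naomi.length ≤ ken.length
instance (naomi : List Int) (ken : List Int) (points : Int) : Decidable (Pre_solveDeceive naomi ken points) := by unfold Pre_solveDeceive; infer_instance

def pvWitness_solveDeceive : List Int × List Int × Int := ([3, 1], [2, 5], 0)

def Spec_solveDeceive (naomi : List Int) (ken : List Int) (points : Int) (out : Int) : Prop := out = solveDeceive_alt naomi ken points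
instance (naomi : List Int) (ken : List Int) (points : Int) (out : Int) : Decidable (Spec_solveDeceive naomi ken points out) := by unfold Spec_solveDeceive; infer_instance

-- ===== CLAIM (what is proved, stated in full; the proofs are below) =====
def Claim_equal_solveDeceive : Prop := ∀ (naomi : List Int) (ken : List Int) (points : Int), Dom_solveDeceive naomi ken points → Pre_solveDeceive naomi ken points → Spec_solveDeceive naomi ken points (solveDeceive naomi ken points)

-- ===== LEMMAS AND PROOFS =====

-- Invariant: A's current ken is a window (full.drop lo).take r of the original ken,
-- with at least naomi.length elements in the window.
theorem solveDeceive_window (naomi : List Int) : ∀ (full : List Int) (lo r : Nat) (pts : Int),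
    naomi.length ≤ r → lo + r ≤ full.length →
    solveDeceiveGoA naomi ((full.drop lo).take r) pts = solveDeceiveGoB full naomi lo pts := by
  induction naomi with
  | nil => intro full lo r pts _ _; simp [solveDeceiveGoA, solveDeceiveGoB]
  | cons n ns ih =>
    intro full lo r pts hr hlr
    have hlo : lo < full.length := by simp at hr ⊢; omega
    have hdrop : full.drop lo = full[lo] :: full.drop (lo + 1) := by
      rw [List.drop_eq_getElem_cons hlo]
    have hr1 : 1 ≤ r := by simp at hr; omega
    have hwin : (full.drop lo).take r = full[lo] :: ((full.drop (lo + 1)).take (r - 1)) := by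
      rw [hdrop]
      cases r with
      | zero => omega
      | succ m => rw [List.take_succ_cons, Nat.add_sub_cancel]
    rw [hwin]
    simp only [solveDeceiveGoA, solveDeceiveGoB, List.getElem?_eq_getElem hlo]
    split
    · -- win: A drops ken front, B advances lo
      have := ih full (lo + 1) (r - 1) (pts + 1) (by simp at hr; omega) (by omega)
      simpa using this
    · -- loss: A drops ken back; the window just shrinks on the right
      have hback : (full[lo] :: ((full.drop (lo + 1)).take (r - 1))).dropLast
          = (full.drop lo).take (r - 1) := by
        rw [← hwin, List.dropLast_eq_take, List.length_take, List.take_take]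
        congr 1
        have : (full.drop lo).length = full.length - lo := by simp
        omega
      rw [hback]
      exact ih full lo (r - 1) pts (by simp at hr; omega) (by omega)

-- ===== VERDICT (by name: the statement is the Claim_ definition above) =====
theorem solveDeceive_spec : Claim_equal_solveDeceive := by
  intro naomi ken points _ hpre
  unfold Spec_solveDeceive solveDeceive solveDeceive_alt
  have := solveDeceive_window naomi ken 0 ken.length 0 hpre (by omega)
  rw [List.drop_zero, List.take_length] at this
  exact this
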